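-- pv_equiv track=rewrite | github.com/Tencent/TFace | recognition/torchkit/util/utils.py | get_class_split
-- ===== SOURCE A (Python) =====
-- def get_class_split(num_classes, num_gpus):
--     """ split the num of classes by num of gpus
--     """
--     class_split = []
--     for i in range(num_gpus):
--         _class_num = num_classes // num_gpus
--         if i < (num_classes % num_gpus):
--             _class_num += 1
--         class_split.append(_class_num)
--     return class_split
-- ===== SOURCE B (Python) =====
-- def get_class_split(num_classes, num_gpus):
--     """ split the num of classes by num of gpus
--     """
--     class_split = []
--     remaining = num_classes
--     gpus_left = num_gpus
--     while gpus_left > 0: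
--         # this GPU takes the ceiling of remaining / gpus_left
--         c = -(-remaining // gpus_left)
--         class_split.append(c)
--         remaining -= c
--         gpus_left -= 1
--     return class_split
-- ===== Notes on version B (the rewrite author's own statement) =====
-- stated objective: alternative
-- what changed: Replaces A's per-index loop that recomputes num_classes//num_gpus and num_classes%num_gpus with a recursive greedy allocation: each GPU takes the ceiling of remaining_classes/remaining_gpus and we recurse on the rest; no modulo is ever computed.
import Mathlib
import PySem

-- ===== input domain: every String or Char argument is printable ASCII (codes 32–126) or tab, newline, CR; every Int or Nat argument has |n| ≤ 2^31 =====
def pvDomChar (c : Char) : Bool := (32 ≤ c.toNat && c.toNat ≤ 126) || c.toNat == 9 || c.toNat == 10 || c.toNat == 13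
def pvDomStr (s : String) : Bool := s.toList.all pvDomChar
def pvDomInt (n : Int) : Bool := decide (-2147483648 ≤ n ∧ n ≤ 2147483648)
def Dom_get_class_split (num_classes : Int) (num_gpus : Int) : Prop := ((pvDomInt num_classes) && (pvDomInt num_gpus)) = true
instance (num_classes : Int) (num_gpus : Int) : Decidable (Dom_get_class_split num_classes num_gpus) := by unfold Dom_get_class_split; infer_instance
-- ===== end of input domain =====

-- B replaces A's per-index loop (q = n//k recomputed each step, +1 while i < n%k) by a
-- recursive greedy allocation: the first GPU takes the ceiling of remaining/remaining_gpus,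
-- then recurse on the rest (no modulo at all). Objective: alternative decomposition.

-- ===== PORT A =====
def get_class_split (num_classes : Int) (num_gpus : Int) : List Int :=
  (PySem.List.pyRange 0 num_gpus 1).foldl
    (fun class_split i =>
      let c := PySem.Int.floordiv num_classes num_gpus
      let c := if i < PySem.Int.mod num_classes num_gpus then c + 1 else c
      class_split ++ [c]) []

-- ===== PORT B =====
-- the while loop of Source B: state (class_split, remaining, gpus_left)
def get_class_split_loop (class_split : List Int) (remaining : Int) (gpus_left : Int) : List Int :=
  if gpus_left ≤ 0 then class_split
  else
    -- c = -(-remaining // gpus_left)  (Python ceiling division)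
    let c := -(PySem.Int.floordiv (-remaining) gpus_left)
    get_class_split_loop (class_split ++ [c]) (remaining - c) (gpus_left - 1)
termination_by gpus_left.toNat
decreasing_by simp_all

def get_class_split_alt (num_classes : Int) (num_gpus : Int) : List Int :=
  get_class_split_loop [] num_classes num_gpus

-- ===== PRECONDITION & SPEC =====
def Spec_get_class_split (num_classes : Int) (num_gpus : Int) (out : List Int) : Prop := out = get_class_split_alt num_classes num_gpus
instance (num_classes : Int) (num_gpus : Int) (out : List Int) : Decidable (Spec_get_class_split num_classes num_gpus out) := by unfold Spec_get_class_split; infer_instance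

-- ===== CLAIM (what is proved, stated in full; the proofs are below) =====
def Claim_equal_get_class_split : Prop := ∀ (num_classes : Int) (num_gpus : Int), Dom_get_class_split num_classes num_gpus → Spec_get_class_split num_classes num_gpus (get_class_split num_classes num_gpus)

-- ===== LEMMAS AND PROOFS =====

-- foldl that only snocs is a map
theorem pv_foldl_snoc (f : Int → Int) (l : List Int) (acc : List Int) :
    l.foldl (fun a i => a ++ [f i]) acc = acc ++ l.map f := by
  induction l generalizing acc with
  | nil => simp
  | cons x xs ih => simp [List.foldl_cons, ih]

-- the threshold map over range m is two replicate blocks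
theorem pv_range_blocks (q r : Int) (hr : 0 ≤ r) (m : Nat) :
    (List.range m).map (fun (k : Nat) => if (k : Int) < r then q + 1 else q)
      = List.replicate (min m r.toNat) (q + 1) ++ List.replicate (m - min m r.toNat) q := by
  induction m with
  | zero => simp
  | succ m ih =>
    rw [List.range_succ, List.map_append, ih]
    by_cases h : (m : Int) < r
    · have h1 : min (m + 1) r.toNat = m + 1 := by omega
      have h2 : min m r.toNat = m := by omega
      simp [h, h2, List.replicate_succ' (n := m)]
    · have h1 : min (m + 1) r.toNat = min m r.toNat := by omega
      have hle : min m r.toNat ≤ m := by omega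
      have h2 : m + 1 - min m r.toNat = (m - min m r.toNat) + 1 := by omega
      simp [h, h1, h2, List.replicate_succ' (n := m - min m r.toNat), List.append_assoc]

-- A's value as two replicate blocks (from the loop proof above)
theorem pv_A_blocks (n : Int) (g : Int) (hg : 0 < g) :
    get_class_split n g
      = List.replicate (PySem.Int.mod n g).toNat (PySem.Int.floordiv n g + 1)
        ++ List.replicate (g - PySem.Int.mod n g).toNat (PySem.Int.floordiv n g) := by
  unfold get_class_split
  set r := PySem.Int.mod n g with hrdef
  have hr0 : 0 ≤ r := PySem.Int.mod_nonneg n hg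
  have hrlt : r < g := PySem.Int.mod_lt n hg
  rw [pv_foldl_snoc (fun i => if i < r then PySem.Int.floordiv n g + 1
      else PySem.Int.floordiv n g),
    PySem.List.pyRange_one, List.map_map]
  have : ((fun i => if i < r then PySem.Int.floordiv n g + 1
      else PySem.Int.floordiv n g) ∘ fun k : Nat => (0 : Int) + k)
      = fun (k : Nat) => if (k : Int) < r then PySem.Int.floordiv n g + 1
      else PySem.Int.floordiv n g := by
    funext k; simp
  rw [this, pv_range_blocks _ r hr0]
  have hmin : min (g - 0).toNat r.toNat = r.toNat := by omega
  have hsub : (g - 0).toNat - r.toNat = (g - r).toNat := by omega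
  rw [hmin, hsub]
  simp

-- B's greedy while loop produces the accumulator followed by the same two blocks
theorem pv_B_blocks : ∀ (g : Nat) (n : Int) (acc : List Int),
    get_class_split_loop acc n ((g : Int) + 1)
      = acc
        ++ List.replicate (PySem.Int.mod n ((g : Int) + 1)).toNat
          (PySem.Int.floordiv n ((g : Int) + 1) + 1)
        ++ List.replicate (((g : Int) + 1) - PySem.Int.mod n ((g : Int) + 1)).toNat
          (PySem.Int.floordiv n ((g : Int) + 1)) := by
  intro g
  induction g with
  | zero =>
    intro n acc
    rw [get_class_split_loop.eq_def]
    simp [get_class_split_loop]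
  | succ g ih =>
    intro n acc
    rw [get_class_split_loop.eq_def]
    push_cast
    have hG : (0 : Int) < (g : Int) + 1 + 1 := by positivity
    set G : Int := (g : Int) + 1 + 1 with hGdef
    set q := PySem.Int.floordiv n G with hq
    set r := PySem.Int.mod n G with hr
    have hn : q * G + r = n := PySem.Int.floordiv_mul_add_mod n G
    have hr0 : 0 ≤ r := PySem.Int.mod_nonneg n hG
    have hrlt : r < G := PySem.Int.mod_lt n hG
    have hGpos : ¬ G ≤ 0 := by omega
    rw [if_neg hGpos]
    by_cases hz : r = 0
    · -- remainder 0: first GPU takes q, remainder stays q per GPU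
      have hc : -(PySem.Int.floordiv (-n) G) = q := by
        rw [PySem.Int.neg_floordiv_neg_eq_iff_of_pos hG]
        constructor <;> nlinarith
      have hG1 : G - 1 = (g : Int) + 1 := by omega
      have hq' : PySem.Int.floordiv (n - q) ((g : Int) + 1) = q := by
        rw [PySem.Int.floordiv_eq_iff_of_pos (by positivity : (0:Int) < (g:Int)+1)]
        constructor <;> nlinarith
      have hm' : PySem.Int.mod (n - q) ((g : Int) + 1) = 0 := by
        have := PySem.Int.floordiv_mul_add_mod (n - q) ((g : Int) + 1)
        rw [hq'] at this; nlinarith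
      rw [hc, hG1, ih (n - q) (acc ++ [q]), hq', hm']
      simp only [hz, Int.toNat_zero, List.replicate_zero, Int.sub_zero]
      have h1 : ((g : Int) + 1).toNat = g + 1 := by omega
      have h2 : G.toNat = g + 2 := by omega
      rw [h1, h2]
      simp [List.replicate_succ]
    · -- remainder r ≥ 1: first GPU takes q+1, remainder has quotient q, remainder r-1
      have hr1 : 1 ≤ r := by omega
      have hc : -(PySem.Int.floordiv (-n) G) = q + 1 := by
        rw [PySem.Int.neg_floordiv_neg_eq_iff_of_pos hG]
        constructor <;> nlinarith
      have hG1 : G - 1 = (g : Int) + 1 := by omega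
      have hq' : PySem.Int.floordiv (n - (q + 1)) ((g : Int) + 1) = q := by
        rw [PySem.Int.floordiv_eq_iff_of_pos (by positivity : (0:Int) < (g:Int)+1)]
        constructor <;> nlinarith
      have hm' : PySem.Int.mod (n - (q + 1)) ((g : Int) + 1) = r - 1 := by
        have := PySem.Int.floordiv_mul_add_mod (n - (q + 1)) ((g : Int) + 1)
        rw [hq'] at this; nlinarith
      rw [hc, hG1, ih (n - (q + 1)) (acc ++ [q + 1]), hq', hm']
      have h1 : r.toNat = (r - 1).toNat + 1 := by omega
      have h2 : (G - r).toNat = (((g : Int) + 1) - (r - 1)).toNat := by omega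
      rw [h1, h2, List.replicate_succ]
      simp

-- ===== VERDICT (by name: the statement is the Claim_ definition above) =====
theorem get_class_split_spec : Claim_equal_get_class_split := by
  intro num_classes num_gpus _
  unfold Spec_get_class_split
  unfold get_class_split_alt
  by_cases hg : num_gpus ≤ 0
  · rw [get_class_split_loop.eq_def, if_pos hg]
    unfold get_class_split
    simp [PySem.List.pyRange_one_eq_nil hg]
  · have hpos : 0 < num_gpus := by omega
    obtain ⟨g, hgq⟩ : ∃ g : Nat, num_gpus = (g : Int) + 1 := ⟨(num_gpus - 1).toNat, by omega⟩
    rw [hgq, pv_B_blocks g num_classes [], pv_A_blocks num_classes ((g : Int) + 1) (by positivity)]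
    simp
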